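-- pv_equiv track=rewrite | github.com/Rishab-q/Autocomp | V1.py | diff_char
-- ===== SOURCE A (Python) =====
-- def diff_char(s1,s2):
--     x=min(len(s1),len(s2))
--     y=""
--     for i in range(x):
--         if(s1[i]==s2[i]):
--             y+=s1[i]
--         else :
--             return y,s1[i] or ''
--     return y,''
-- ===== SOURCE B (Python) =====
-- def diff_char(s1, s2):
--     x = min(len(s1), len(s2))
--     i = next((j for j in range(x) if s1[j] != s2[j]), x)
--     return s1[:i], (s1[i] if i < x else '')
-- ===== Notes on version B (the rewrite author's own statement) =====
-- stated objective: alternative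
-- what changed: Replaces the char-by-char accumulator with early return by a search for the first differing index followed by a slice s1[:i] and a single indexed lookup.
import Mathlib
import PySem

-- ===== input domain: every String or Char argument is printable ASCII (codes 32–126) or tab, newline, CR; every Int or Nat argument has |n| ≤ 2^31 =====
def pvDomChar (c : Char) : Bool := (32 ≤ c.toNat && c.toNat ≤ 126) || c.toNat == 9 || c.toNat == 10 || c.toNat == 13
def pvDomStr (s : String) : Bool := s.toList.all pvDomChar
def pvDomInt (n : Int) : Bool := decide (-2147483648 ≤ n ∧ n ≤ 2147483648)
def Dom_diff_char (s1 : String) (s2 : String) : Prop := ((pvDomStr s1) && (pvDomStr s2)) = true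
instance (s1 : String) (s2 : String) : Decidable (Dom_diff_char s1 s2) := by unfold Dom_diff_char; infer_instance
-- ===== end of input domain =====

-- ===== PORT A =====
-- loop over paired chars of s1,s2, accumulating matched prefix (A's for over range(x))
def diffCharLoopA : List Char → List Char → List Char → String × String
  | c1 :: t1, c2 :: t2, acc =>
      if c1 == c2 then diffCharLoopA t1 t2 (acc ++ [c1])
      else (String.ofList acc, String.ofList [c1])
  | _, _, acc => (String.ofList acc, "")

def diff_char (s1 : String) (s2 : String) : String × String :=
  diffCharLoopA s1.toList s2.toList []

-- ===== PORT B =====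
-- B: first differing index (x if none within min length), then slice + single lookup
def firstDiffIdx : List Char → List Char → Nat
  | c1 :: t1, c2 :: t2 => if c1 ≠ c2 then 0 else firstDiffIdx t1 t2 + 1
  | _, _ => 0

def diff_char_alt (s1 : String) (s2 : String) : String × String :=
  let l1 := s1.toList
  let x := min l1.length s2.toList.length
  let i := firstDiffIdx l1 s2.toList
  (String.ofList (l1.take i), if i < x then String.ofList ((l1.drop i).take 1) else "")

-- ===== PRECONDITION & SPEC =====
def Spec_diff_char (s1 : String) (s2 : String) (out : String × String) : Prop := out = diff_char_alt s1 s2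
instance (s1 : String) (s2 : String) (out : String × String) : Decidable (Spec_diff_char s1 s2 out) := by unfold Spec_diff_char; infer_instance

-- ===== CLAIM (what is proved, stated in full; the proofs are below) =====
def Claim_equal_diff_char : Prop := ∀ (s1 : String) (s2 : String), Dom_diff_char s1 s2 → Spec_diff_char s1 s2 (diff_char s1 s2)

-- ===== LEMMAS AND PROOFS =====

-- ===== VERDICT (by name: the statement is the Claim_ definition above) =====
lemma loopA_eq (l1 l2 : List Char) : ∀ acc : List Char,
    diffCharLoopA l1 l2 acc =
      (String.ofList (acc ++ l1.take (firstDiffIdx l1 l2)),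
       if firstDiffIdx l1 l2 < min l1.length l2.length then
         String.ofList ((l1.drop (firstDiffIdx l1 l2)).take 1) else "") := by
  induction l1 generalizing l2 with
  | nil => intro acc; cases l2 <;> simp [diffCharLoopA, firstDiffIdx]
  | cons c1 t1 ih =>
    intro acc
    cases l2 with
    | nil => simp [diffCharLoopA, firstDiffIdx]
    | cons c2 t2 =>
      by_cases h : c1 = c2
      · subst h
        simp only [diffCharLoopA, firstDiffIdx, beq_self_eq_true, if_true, ne_eq,
          not_true_eq_false, if_false, ih t2]
        simp [List.take_succ_cons, List.drop_succ_cons]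
      · simp [diffCharLoopA, firstDiffIdx, h]

theorem diff_char_spec : Claim_equal_diff_char := by
  intro s1 s2 _
  unfold Spec_diff_char diff_char diff_char_alt
  simp [loopA_eq]
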